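-- pv_equiv track=rewrite | github.com/Gabkings/alogorithms-practise | recursion/bfs_algorithms/traversing_algorithms/amazonOnlineTests/isRobotBounded.py | stock_prices
-- ===== SOURCE A (Python) =====
-- def stock_prices(stockPrice):
--     #initialize month variable with 0
--     month=0
--     change=max(stockPrice)
--     #Create a list to hold values
--     l=[]
--     total_sum = 0
--     for i in range(len(stockPrice)):
--         total_sum+=stockPrice[i]
--     left = 0
--     left_sum = 0
--     while(len(stockPrice)>1):
--         left = stockPrice.pop(0)
--         l.append(left)
--         #Now calculate the average
--         left_sum += left
--         avg1=left_sum //len(l)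
--         avg2=(total_sum-left_sum)//len(stockPrice)
--
--         if(abs(avg1-avg2)<change):
--             change=abs(avg1-avg2)
--             month=len(l)
--
--     return month
-- ===== SOURCE B (Python) =====
-- def stock_prices(stockPrice):
--     # One pass with prefix sums; no pop(0), does not mutate the input.
--     change = max(stockPrice)
--     total = sum(stockPrice)
--     n = len(stockPrice)
--     month = 0
--     left_sum = 0
--     for k, price in enumerate(stockPrice[:-1], 1):
--         left_sum += price
--         d = abs(left_sum // k - (total - left_sum) // (n - k))
--         if d < change:
--             change = d
--             month = k
--     return month
-- ===== Notes on version B (the rewrite author's own statement) =====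
-- stated objective: faster
-- what changed: Replaces the while-loop that pops the list head (O(n) per step) and rebuilds a left list with a single enumerate pass keeping a running prefix sum and count.
import Mathlib
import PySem

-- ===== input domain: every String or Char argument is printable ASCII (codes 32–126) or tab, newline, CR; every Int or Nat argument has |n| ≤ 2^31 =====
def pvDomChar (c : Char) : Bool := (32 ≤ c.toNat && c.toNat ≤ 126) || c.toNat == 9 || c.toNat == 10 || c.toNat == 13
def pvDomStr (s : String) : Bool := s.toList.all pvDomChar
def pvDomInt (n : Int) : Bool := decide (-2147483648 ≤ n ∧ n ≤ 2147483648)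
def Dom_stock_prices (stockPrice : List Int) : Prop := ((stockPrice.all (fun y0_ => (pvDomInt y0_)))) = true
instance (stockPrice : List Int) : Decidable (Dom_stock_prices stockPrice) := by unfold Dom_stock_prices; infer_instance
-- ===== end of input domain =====

-- B replaces A's quadratic pop(0) while-loop by one prefix-sum pass (and, unlike A,
-- does not mutate its argument; the equivalence proved here is about the return value).

-- ===== PORT A =====
-- the while(len(stockPrice)>1) loop: pops the head, appends it to l, updates the running state
def stockPricesLoop (stockPrice l : List Int) (left_sum total_sum change month : Int) : Int :=
  match stockPrice with
  | x :: y :: rest =>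
    let l' := l ++ [x]
    let ls := left_sum + x
    let avg1 := PySem.Int.floordiv ls (l'.length : Int)
    let avg2 := PySem.Int.floordiv (total_sum - ls) (((y :: rest).length : Nat) : Int)
    if |avg1 - avg2| < change then
      stockPricesLoop (y :: rest) l' ls total_sum (|avg1 - avg2|) (l'.length : Int)
    else
      stockPricesLoop (y :: rest) l' ls total_sum change month
  | _ => month

def stock_prices (stockPrice : List Int) : Int :=
  let change := (PySem.List.max? stockPrice (fun y => y)).getD 0   -- max(stockPrice); [] excluded by Pre_
  let total_sum := (PySem.List.pyRange 0 (stockPrice.length : Int) 1).foldl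
    (fun acc i => acc + PySem.List.pyGetD stockPrice i 0) 0
  stockPricesLoop stockPrice [] 0 total_sum change 0

-- ===== PORT B =====
-- one step of the 'for k, price in enumerate(stockPrice[:-1], 1)' loop; state = (month, change, left_sum)
def stockPricesAltStep (total n : Int) (st : Int × Int × Int) (p : Int × Int) : Int × Int × Int :=
  let ls := st.2.2 + p.2
  let d := |PySem.Int.floordiv ls p.1 - PySem.Int.floordiv (total - ls) (n - p.1)|
  if d < st.2.1 then (p.1, d, ls) else (st.1, st.2.1, ls)

def stock_prices_alt (stockPrice : List Int) : Int :=
  let change := (PySem.List.max? stockPrice (fun y => y)).getD 0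
  let total := stockPrice.sum
  let n : Int := (stockPrice.length : Int)
  ((PySem.List.enumerate (PySem.List.slice stockPrice none (some (-1))) 1).foldl
      (stockPricesAltStep total n) (0, change, 0)).1

-- ===== PRECONDITION & SPEC =====
-- Pre_ excludes only the empty list, on which A raises ValueError (max of an empty sequence).
def Pre_stock_prices (stockPrice : List Int) : Prop := stockPrice ≠ []
instance (stockPrice : List Int) : Decidable (Pre_stock_prices stockPrice) := by unfold Pre_stock_prices; infer_instance
def pvWitness_stock_prices : List Int := ([1, 2, 3])

def Spec_stock_prices (stockPrice : List Int) (out : Int) : Prop := out = stock_prices_alt stockPrice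
instance (stockPrice : List Int) (out : Int) : Decidable (Spec_stock_prices stockPrice out) := by unfold Spec_stock_prices; infer_instance

-- ===== CLAIM (what is proved, stated in full; the proofs are below) =====
def Claim_equal_stock_prices : Prop := ∀ (stockPrice : List Int), Dom_stock_prices stockPrice → Pre_stock_prices stockPrice → Spec_stock_prices stockPrice (stock_prices stockPrice)

-- ===== LEMMAS AND PROOFS =====

-- A's pop loop equals B's enumerate fold, for any partially consumed state:
-- l holds the already-popped prefix, so the next month index is l.length + 1 and
-- the total length is l.length + xs.length.
lemma loop_eq_fold (xs : List Int) : ∀ (l : List Int) (ls total change month : Int),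
    stockPricesLoop xs l ls total change month
      = ((PySem.List.enumerate xs.dropLast ((l.length : Int) + 1)).foldl
          (stockPricesAltStep total ((l.length : Int) + (xs.length : Int))) (month, change, ls)).1 := by
  induction xs with
  | nil => intro l ls total change month; simp [stockPricesLoop, PySem.List.enumerate_nil]
  | cons x t ih =>
    intro l ls total change month
    cases t with
    | nil => simp [stockPricesLoop, PySem.List.enumerate_nil]
    | cons y rest =>
      have hdrop : (x :: y :: rest).dropLast = x :: (y :: rest).dropLast := rfl
      rw [hdrop, PySem.List.enumerate_cons]
      simp only [stockPricesLoop, List.foldl_cons]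
      have hstep : stockPricesAltStep total ((l.length : Int) + ((x :: y :: rest).length : Int))
            (month, change, ls) ((l.length : Int) + 1, x)
          = if |PySem.Int.floordiv (ls + x) ((l ++ [x]).length : Int)
                - PySem.Int.floordiv (total - (ls + x)) (((y :: rest).length : Nat) : Int)| < change
            then ((l.length : Int) + 1,
                  |PySem.Int.floordiv (ls + x) ((l ++ [x]).length : Int)
                   - PySem.Int.floordiv (total - (ls + x)) (((y :: rest).length : Nat) : Int)|, ls + x)
            else (month, change, ls + x) := by
        simp only [stockPricesAltStep, List.length_append, List.length_cons, List.length_nil]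
        have h1 : ((l.length : Int) + ((rest.length + 1 + 1 : Nat) : Int)) - ((l.length : Int) + 1)
            = ((rest.length + 1 : Nat) : Int) := by push_cast; ring
        have h2 : ((l.length + 1 : Nat) : Int) = (l.length : Int) + 1 := by push_cast; ring
        rw [h1, h2]
      rw [hstep]
      have hl : (((l ++ [x]).length : Nat) : Int) = (l.length : Int) + 1 := by
        simp only [List.length_append, List.length_cons, List.length_nil]; push_cast; ring
      have hn : (((l ++ [x]).length : Nat) : Int) + (((y :: rest).length : Nat) : Int)
          = (l.length : Int) + (((x :: y :: rest).length : Nat) : Int) := by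
        simp only [List.length_append, List.length_cons, List.length_nil]; push_cast; ring
      split_ifs with h
      · rw [ih (l ++ [x]) (ls + x) total _ _, hn, hl]
      · rw [ih (l ++ [x]) (ls + x) total change month, hn, hl]

-- A's index-loop total equals List.sum
lemma total_eq_sum (xs : List Int) :
    (PySem.List.pyRange 0 (xs.length : Int) 1).foldl
      (fun acc i => acc + PySem.List.pyGetD xs i 0) 0 = xs.sum := by
  rw [PySem.List.foldl_pyRange_zero_pyGetD' xs 0 (fun acc v => acc + v) 0]
  induction xs using List.reverseRecOn with
  | nil => simp
  | append_singleton t x ih => simp [List.foldl_append, ih]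

-- ===== VERDICT (by name: the statement is the Claim_ definition above) =====
theorem stock_prices_spec : Claim_equal_stock_prices := by
  intro xs _ _
  unfold Spec_stock_prices stock_prices stock_prices_alt
  rw [total_eq_sum, loop_eq_fold, PySem.List.slice_to_neg_one]
  norm_num
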